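-- pv_equiv track=rewrite | github.com/ramankarki/learning-python | computer_scientist/list_algorithms/try_.py | prime_in
-- ===== SOURCE A (Python) =====
-- def is_prime(n):
--     least_prime = [2,3,5,7,11]
--     for i in least_prime:
--         if n == 1:
--             return False
--         elif n % i == 0:
--             return False
--     return True
--
-- def prime_in(array):
--     least_prime = [2,3,5,7,11]
--     prime_collect = []
--     remaining = []
--     for i in array:
--         if i in least_prime:
--             prime_collect.append(i)
--         else:
--             remaining.append(i)
--
--     for i in remaining:
--         if is_prime(i):
--             prime_collect.append(i)
--
--     return len(prime_collect)
-- ===== SOURCE B (Python) =====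
-- # Wheel approach: precompute a 2310-entry sieve (2310 = 2*3*5*7*11) by striking
-- # multiples, then classify each element by a single table lookup on i % 2310.
-- _WHEEL = 2310
-- _TABLE = bytearray([1]) * _WHEEL
-- for _p in (2, 3, 5, 7, 11):
--     for _m in range(0, _WHEEL, _p):
--         _TABLE[_m] = 0
--
-- def prime_in(array):
--     count = 0
--     for i in array:
--         if _TABLE[i % _WHEEL]:
--             count += i != 1
--         else:
--             count += i in (2, 3, 5, 7, 11)
--     return count
-- ===== Notes on version B (the rewrite author's own statement) =====
-- stated objective: faster
-- what changed: Replaces the per-element trial-division test and the two-list partition by a precomputed 2310-entry wheel sieve (multiples of 2,3,5,7,11 struck once up front) so each element is classified by one table lookup on i % 2310 plus the small-prime/1 exceptions.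
import Mathlib
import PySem

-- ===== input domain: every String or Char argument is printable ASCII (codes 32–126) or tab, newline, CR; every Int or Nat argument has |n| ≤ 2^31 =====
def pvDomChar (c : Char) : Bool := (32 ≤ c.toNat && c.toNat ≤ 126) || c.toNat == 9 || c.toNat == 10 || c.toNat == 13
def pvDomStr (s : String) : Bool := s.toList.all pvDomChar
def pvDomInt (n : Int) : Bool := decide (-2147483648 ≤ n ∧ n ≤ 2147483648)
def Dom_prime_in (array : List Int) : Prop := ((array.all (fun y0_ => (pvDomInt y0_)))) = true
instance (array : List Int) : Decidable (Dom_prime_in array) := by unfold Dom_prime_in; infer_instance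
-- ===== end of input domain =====

-- B: precomputed 2310-entry wheel sieve (multiples of 2,3,5,7,11 struck once) + one table
-- lookup on i % 2310 per element, replacing A's per-element trial division and two-list partition.

-- ===== PORT A =====
-- is_prime's for-loop with early returns, as structural recursion over the literal list
def isPrimeLoopA (n : Int) : List Int → Bool
  | [] => true
  | i :: rest =>
    if n == 1 then false
    else if PySem.Int.mod n i == 0 then false
    else isPrimeLoopA n rest

def is_primeA (n : Int) : Bool := isPrimeLoopA n [2, 3, 5, 7, 11]

def prime_in (array : List Int) : Int :=
  let least_prime : List Int := [2, 3, 5, 7, 11]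
  -- first loop: partition into prime_collect / remaining (appending at the back, as Python does)
  let s := array.foldl
    (fun (s : List Int × List Int) i =>
      if least_prime.contains i then (s.1 ++ [i], s.2) else (s.1, s.2 ++ [i]))
    ([], [])
  -- second loop over remaining
  let prime_collect := s.2.foldl
    (fun pc i => if is_primeA i then pc ++ [i] else pc) s.1
  (prime_collect.length : Int)

-- ===== PORT B =====
-- module-level sieve construction: table of 2310 ones, then strike multiples of each p
def pvTableB : List Bool :=
  [2, 3, 5, 7, 11].foldl
    (fun t p =>
      (PySem.List.pyRange 0 2310 p).foldl (fun t m => t.set m.toNat false) t)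
    (List.replicate 2310 true)

def prime_in_alt (array : List Int) : Int :=
  array.foldl
    (fun c i =>
      if pvTableB.getD (PySem.Int.mod i 2310).toNat false then
        c + (if i != 1 then 1 else 0)
      else
        c + (if [2, 3, 5, 7, 11].contains i then 1 else 0))
    (0 : Int)

-- ===== PRECONDITION & SPEC =====
def Spec_prime_in (array : List Int) (out : Int) : Prop := out = prime_in_alt array
instance (array : List Int) (out : Int) : Decidable (Spec_prime_in array out) := by unfold Spec_prime_in; infer_instance

-- ===== CLAIM (what is proved, stated in full; the proofs are below) =====
def Claim_equal_prime_in : Prop := ∀ (array : List Int), Dom_prime_in array → Spec_prime_in array (prime_in array)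

-- ===== LEMMAS AND PROOFS =====

theorem foldl_set_length (ms : List Int) (t : List Bool) :
    (ms.foldl (fun t m => t.set m.toNat false) t).length = t.length := by
  induction ms generalizing t with
  | nil => rfl
  | cons m ms ih => simp [List.foldl_cons, ih]

theorem foldl_set_getD (ms : List Int) (t : List Bool) (r : Nat) (hr : r < t.length) :
    (ms.foldl (fun t m => t.set m.toNat false) t).getD r false
      = if ms.any (fun m => m.toNat == r) then false else t.getD r false := by
  induction ms generalizing t with
  | nil => simp
  | cons m ms ih =>
    rw [List.foldl_cons, ih _ (by simpa using hr)]
    by_cases hm : (m.toNat == r) = true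
    · have hmr : m.toNat = r := by simpa using hm
      subst hmr
      by_cases ha : (ms.any (fun m' => m'.toNat == m.toNat)) = true <;>
        simp [ha, List.getD_eq_getElem?_getD, List.getElem?_set_self hr]
    · have hne : m.toNat ≠ r := by simpa using hm
      simp [List.any_cons, hm, List.getD_eq_getElem?_getD, List.getElem?_set_ne hne]

theorem strike_getD (p : Int) (hp : 0 < p) (t : List Bool) (ht : t.length = 2310)
    (r : Nat) (hr : r < 2310) :
    ((PySem.List.pyRange 0 2310 p).foldl (fun t m => t.set m.toNat false) t).getD r false
      = if p ∣ (r : Int) then false else t.getD r false := by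
  rw [foldl_set_getD _ _ _ (by omega)]
  have hany : ((PySem.List.pyRange 0 2310 p).any (fun m => m.toNat == r))
      = decide (p ∣ (r : Int)) := by
    by_cases hd : p ∣ (r : Int)
    · simp only [hd, decide_true, List.any_eq_true]
      refine ⟨(r : Int), ?_, by simp⟩
      rw [PySem.List.mem_pyRange_iff_of_pos hp]
      refine ⟨by positivity, by exact_mod_cast hr, by simpa using hd⟩
    · simp only [hd, decide_false, List.any_eq_false]
      intro m hm
      rw [PySem.List.mem_pyRange_iff_of_pos hp] at hm
      obtain ⟨h0, _, hdv⟩ := hm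
      simp only [beq_iff_eq]
      intro hmr
      apply hd
      have : m = (r : Int) := by omega
      simpa [this] using hdv
  rw [hany]
  by_cases hd : p ∣ (r : Int) <;> simp [hd]

theorem sieve_getD : ∀ (ps : List Int) (t : List Bool), t.length = 2310 →
    (∀ p ∈ ps, 0 < p) → ∀ r : Nat, r < 2310 →
    (ps.foldl (fun t p => (PySem.List.pyRange 0 2310 p).foldl
        (fun t m => t.set m.toNat false) t) t).getD r false
      = ((ps.all (fun p => !decide (p ∣ (r : Int)))) && t.getD r false) := by
  intro ps
  induction ps with
  | nil => intro t ht hs r hr; simp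
  | cons p ps ih =>
    intro t ht hs r hr
    rw [List.foldl_cons,
        ih _ (by rw [foldl_set_length]; exact ht) (fun q hq => hs q (List.mem_cons_of_mem _ hq)) r hr,
        strike_getD p (hs p List.mem_cons_self) t ht r hr]
    by_cases hd : p ∣ (r : Int) <;> simp [hd, Bool.and_comm]

theorem tableB_spec (r : Nat) (hr : r < 2310) :
    pvTableB.getD r false = ([2,3,5,7,11] : List Int).all (fun p => !decide (p ∣ (r : Int))) := by
  rw [show pvTableB = (([2,3,5,7,11] : List Int).foldl (fun t p =>
      (PySem.List.pyRange 0 2310 p).foldl (fun t m => t.set m.toNat false) t)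
      (List.replicate 2310 true)) from rfl,
    sieve_getD _ _ (List.length_replicate) (by decide) r hr, List.getD_replicate _ hr, Bool.and_true]

theorem loopA_all (n : Int) (h : n ≠ 1) :
    ∀ l : List Int, isPrimeLoopA n l = l.all (fun i => PySem.Int.mod n i != 0) := by
  intro l
  induction l with
  | nil => rfl
  | cons i rest ih =>
    simp only [isPrimeLoopA, List.all_cons]
    by_cases hm : (PySem.Int.mod n i == 0) = true <;> simp [h, hm, ih, bne]

theorem fold1_eq (p : Int → Bool) :
    ∀ (xs : List Int) (a b : List Int),
    xs.foldl (fun (s : List Int × List Int) i =>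
      if p i then (s.1 ++ [i], s.2) else (s.1, s.2 ++ [i])) (a, b)
      = (a ++ xs.filter p, b ++ xs.filter (fun i => ! p i)) := by
  intro xs
  induction xs with
  | nil => intro a b; simp
  | cons x xs ih =>
    intro a b
    by_cases hx : p x = true <;> simp [List.foldl_cons, hx, ih]

theorem fold2_len (q : Int → Bool) :
    ∀ (xs : List Int) (a : List Int),
    (xs.foldl (fun pc i => if q i then pc ++ [i] else pc) a).length
      = a.length + (xs.filter q).length := by
  intro xs
  induction xs with
  | nil => intro a; simp
  | cons x xs ih =>
    intro a
    by_cases hx : q x = true <;> simp [List.foldl_cons, hx, ih] <;> omega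

theorem count_split (p q : Int → Bool) (xs : List Int) :
    (xs.filter p).length + ((xs.filter fun i => ! p i).filter q).length
      = (xs.filter fun i => p i || q i).length := by
  induction xs with
  | nil => simp
  | cons x xs ih =>
    by_cases hx : p x = true
    · simp [hx, ← ih]; omega
    · by_cases hq : q x = true <;> simp [hx, hq, ← ih] <;> omega

-- lookup of i % 2310 in the sieve equals A's trial-division test on i itself
theorem tableB_lookup (i : Int) :
    pvTableB.getD (PySem.Int.mod i 2310).toNat false
      = ([2, 3, 5, 7, 11] : List Int).all (fun p => PySem.Int.mod i p != 0) := by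
  have h2310 : (0 : Int) < 2310 := by norm_num
  have hr : PySem.Int.mod i 2310 = i % 2310 := PySem.Int.mod_eq_emod_of_pos h2310
  have hnn : 0 ≤ i % 2310 := Int.emod_nonneg i (by norm_num)
  set n : Nat := (i % 2310).toNat with hn
  have hcast : ((n : Int)) = i % 2310 := Int.toNat_of_nonneg hnn
  have hlt : n < 2310 := by
    have := Int.emod_lt_of_pos i h2310
    omega
  have hfac : ∀ p : Int, 0 < p → p ∣ 2310 →
      (!decide (p ∣ (n : Int))) = (PySem.Int.mod i p != 0) := by
    intro p hp hd
    have h2 : p ∣ (n : Int) ↔ p ∣ i := by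
      rw [hcast, Int.dvd_iff_emod_eq_zero, Int.dvd_iff_emod_eq_zero,
          Int.emod_emod_of_dvd i hd]
    by_cases h : p ∣ i
    · simp [h2, h, PySem.Int.mod_eq_zero_iff_dvd]
    · have : PySem.Int.mod i p ≠ 0 := fun hz => h ((PySem.Int.mod_eq_zero_iff_dvd i p).mp hz)
      simp [h2, h, this]
  rw [hr, ← hn, tableB_spec n hlt]
  simp only [List.all_cons, List.all_nil, Bool.and_true,
    hfac 2 (by norm_num) (by norm_num), hfac 3 (by norm_num) (by norm_num),
    hfac 5 (by norm_num) (by norm_num), hfac 7 (by norm_num) (by norm_num),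
    hfac 11 (by norm_num) (by norm_num)]

-- per-element agreement: B's table branch adds 1 exactly when A's predicate holds
theorem pred_eq (i : Int) :
    (if pvTableB.getD (PySem.Int.mod i 2310).toNat false then
        (if i != 1 then (1 : Int) else 0)
      else (if ([2,3,5,7,11] : List Int).contains i then (1 : Int) else 0))
      = (if ([2,3,5,7,11] : List Int).contains i || is_primeA i then (1 : Int) else 0) := by
  rw [tableB_lookup]
  by_cases hc : (([2, 3, 5, 7, 11] : List Int).all (fun p => PySem.Int.mod i p != 0)) = true
  · -- coprime: i cannot be one of 2,3,5,7,11
    have hni : (([2,3,5,7,11] : List Int).contains i) = false := by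
      by_contra h
      have hmem : i ∈ ([2,3,5,7,11] : List Int) := by
        simpa using Bool.of_not_eq_false h
      have := (List.all_eq_true.mp hc) i hmem
      fin_cases hmem <;> revert this <;> decide
    by_cases h1 : i = 1
    · subst h1
      rw [hc, hni]
      have : is_primeA 1 = false := rfl
      simp [this]
    · rw [hc, hni]
      simp only [Bool.false_or, is_primeA, loopA_all i h1, hc]
      simp [h1]
  · -- not coprime: is_primeA i is false
    have hip : is_primeA i = false := by
      by_cases h1 : i = 1
      · subst h1; rfl
      · rw [is_primeA, loopA_all i h1]
        exact Bool.of_not_eq_true hc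
    simp [hip, Bool.of_not_eq_true hc]

theorem countB (xs : List Int) (c : Int) :
    xs.foldl
      (fun c i =>
        if pvTableB.getD (PySem.Int.mod i 2310).toNat false then
          c + (if i != 1 then 1 else 0)
        else
          c + (if ([2,3,5,7,11] : List Int).contains i then 1 else 0)) c
      = c + ((xs.filter fun i => ([2,3,5,7,11] : List Int).contains i || is_primeA i).length : Int) := by
  induction xs generalizing c with
  | nil => simp
  | cons x xs ih =>
    rw [List.foldl_cons, List.filter_cons]
    have hstep :
        (if pvTableB.getD (PySem.Int.mod x 2310).toNat false then
            c + (if x != 1 then (1 : Int) else 0)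
          else c + (if ([2,3,5,7,11] : List Int).contains x then (1 : Int) else 0))
          = c + (if ([2,3,5,7,11] : List Int).contains x || is_primeA x then (1 : Int) else 0) := by
      rw [← pred_eq x]
      split <;> rfl
    rw [hstep, ih]
    by_cases hq : (([2,3,5,7,11] : List Int).contains x || is_primeA x) = true <;>
      simp only [hq, if_true, if_false, Bool.false_eq_true, List.length_cons] <;>
      push_cast <;> ring

-- ===== VERDICT (by name: the statement is the Claim_ definition above) =====
theorem prime_in_spec : Claim_equal_prime_in := by
  intro array _
  show prime_in array = prime_in_alt array
  simp only [prime_in, prime_in_alt, fold1_eq, fold2_len, countB, List.nil_append]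
  rw [← count_split (fun i => ([2,3,5,7,11] : List Int).contains i) is_primeA array]
  push_cast
  ring
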